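-- pv_equiv track=rewrite | github.com/nathancarter/how2data | research/prepare-latex-files.py | fix_md
-- ===== SOURCE A (Python) =====
-- def fix_md ( markdown ):
--     lines = markdown.split( '\n' )
--     for i in range( len( lines ) ):
--         lines[i] = lines[i].replace( '\\( ', '$' )
--         lines[i] = lines[i].replace( ' \\)', '$' )
--         lines[i] = lines[i].replace( '\\(', '$' )
--         lines[i] = lines[i].replace( '\\)', '$' )
--         if i > 0:
--             if lines[i][:2] == '- ' and lines[i-1][:2] != '- ' and lines[i-1] != '':
--                 lines[i-1] += '\n'
--             if lines[i][:2] == '* ' and lines[i-1][:2] != '* ' and lines[i-1] != '':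
--                 lines[i-1] += '\n'
--     return '\n'.join( lines )
-- ===== SOURCE B (Python) =====
-- def fix_md(markdown):
--     def norm(line):
--         for pat in ('\\( ', ' \\)', '\\(', '\\)'):
--             line = line.replace(pat, '$')
--         return line
--
--     def needs_blank(prev, cur):
--         return cur[:2] in ('- ', '* ') and prev[:2] != cur[:2] and prev != ''
--
--     def weave(lines):
--         if len(lines) < 2:
--             return list(lines)
--         head, nxt = lines[0], lines[1]
--         rest = weave(lines[1:])
--         return [head, ''] + rest if needs_blank(head, nxt) else [head] + rest
--
--     return '\n'.join(weave([norm(l) for l in markdown.split('\n')]))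
-- ===== Notes on version B (the rewrite author's own statement) =====
-- stated objective: simpler
-- what changed: B normalizes delimiters in a separate pass and then, instead of mutating the previous list element by appending a newline, weaves a fresh output list inserting an empty line before a list item whose marker differs from the non-empty previous line.
import Mathlib
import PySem

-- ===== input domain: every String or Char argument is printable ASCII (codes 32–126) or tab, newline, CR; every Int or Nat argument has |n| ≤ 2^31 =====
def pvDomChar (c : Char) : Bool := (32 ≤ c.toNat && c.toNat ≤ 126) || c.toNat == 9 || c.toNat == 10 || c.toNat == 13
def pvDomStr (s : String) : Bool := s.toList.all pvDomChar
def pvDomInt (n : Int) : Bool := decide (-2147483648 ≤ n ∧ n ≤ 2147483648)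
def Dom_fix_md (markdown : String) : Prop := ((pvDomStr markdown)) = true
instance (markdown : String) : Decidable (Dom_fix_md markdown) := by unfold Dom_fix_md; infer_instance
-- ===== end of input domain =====

-- B separates delimiter normalization from spacing and inserts a blank line before list items
-- instead of mutating the previous line in place; objective: simpler. Same return value everywhere.


-- ===== PORT A =====
-- the four in-place replacements applied to one line (A does them inline, in this order)
def pvNorm (s : String) : String :=
  PySem.Str.replace (PySem.Str.replace (PySem.Str.replace (PySem.Str.replace
    s "\\( " "$") " \\)" "$") "\\(" "$") "\\)" "$"

-- one iteration of A's 'for i in range(len(lines))' body, mutating the list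
def pvStepA (ls : List String) (i : Nat) : List String :=
  let li := pvNorm (ls.getD i "")
  let ls1 := ls.set i li
  if 0 < i then
    let prev := ls1.getD (i - 1) ""
    let ls2 :=
      if PySem.Str.slice li none (some 2) = "- " ∧
         ¬ PySem.Str.slice prev none (some 2) = "- " ∧ prev ≠ "" then
        ls1.set (i - 1) (prev ++ "\n")
      else ls1
    let prev2 := ls2.getD (i - 1) ""
    if PySem.Str.slice li none (some 2) = "* " ∧
       ¬ PySem.Str.slice prev2 none (some 2) = "* " ∧ prev2 ≠ "" then
      ls2.set (i - 1) (prev2 ++ "\n")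
    else ls2
  else ls1

def fix_md (markdown : String) : String :=
  -- markdown.split('\n'): the separator is the non-empty literal '\n', so split? is always some
  let lines := (PySem.Str.split? markdown "\n").getD []
  PySem.Str.join "\n" ((List.range lines.length).foldl pvStepA lines)

-- ===== PORT B =====
-- B's needs_blank(prev, cur)
def pvNeedsBlank (prev cur : String) : Bool :=
  (PySem.Str.slice cur none (some 2) == "- " || PySem.Str.slice cur none (some 2) == "* ")
  && PySem.Str.slice prev none (some 2) != PySem.Str.slice cur none (some 2)
  && prev != ""

-- B's weave: build a fresh list, inserting '' before a list item that needs a blank line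
def pvWeave : List String → List String
  | [] => []
  | [a] => [a]
  | a :: b :: rest =>
      if pvNeedsBlank a b then a :: "" :: pvWeave (b :: rest)
      else a :: pvWeave (b :: rest)

def fix_md_alt (markdown : String) : String :=
  PySem.Str.join "\n" (pvWeave (((PySem.Str.split? markdown "\n").getD []).map pvNorm))

-- ===== PRECONDITION & SPEC =====
def Spec_fix_md (markdown : String) (out : String) : Prop := out = fix_md_alt markdown
instance (markdown : String) (out : String) : Decidable (Spec_fix_md markdown out) := by unfold Spec_fix_md; infer_instance

-- ===== CLAIM (what is proved, stated in full; the proofs are below) =====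
def Claim_equal_fix_md : Prop := ∀ (markdown : String), Dom_fix_md markdown → Spec_fix_md markdown (fix_md markdown)

-- ===== LEMMAS AND PROOFS =====

-- functional model of A's mutated list: each line gets '\n' appended when the NEXT line needs a blank
def pvFix : List String → List String
  | [] => []
  | [a] => [a]
  | a :: b :: rest =>
      (if pvNeedsBlank a b then a ++ "\n" else a) :: pvFix (b :: rest)

-- pvFix without its last element
def pvBody : List String → List String
  | [] => []
  | [_] => []
  | a :: b :: rest =>
      (if pvNeedsBlank a b then a ++ "\n" else a) :: pvBody (b :: rest)

theorem pvFix_eq_body_append : ∀ (l : List String), l ≠ [] →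
    pvFix l = pvBody l ++ [l.getLastD ""] := by
  intro l
  induction l with
  | nil => intro h; exact absurd rfl h
  | cons a t ih =>
    intro _
    cases t with
    | nil => simp [pvFix, pvBody]
    | cons b r =>
      simp only [pvFix, pvBody]
      rw [ih (by simp)]
      simp

theorem pvBody_length : ∀ (l : List String), (pvBody l).length = l.length - 1 := by
  intro l
  induction l with
  | nil => simp [pvBody]
  | cons a t ih =>
    cases t with
    | nil => simp [pvBody]
    | cons b r => simp [pvBody, ih]

theorem pvBody_snoc : ∀ (l : List String) (b : String), l ≠ [] →
    pvBody (l ++ [b]) =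
      pvBody l ++ [if pvNeedsBlank (l.getLastD "") b then l.getLastD "" ++ "\n" else l.getLastD ""] := by
  intro l
  induction l with
  | nil => intro b h; exact absurd rfl h
  | cons a t ih =>
    intro b _
    cases t with
    | nil => simp [pvBody]
    | cons c r =>
      show pvBody (a :: c :: (r ++ [b])) = _
      simp only [pvBody]
      rw [← List.cons_append, ih b (by simp)]
      simp

-- (xs ++ y :: t).set xs.length v = xs ++ v :: t
theorem pvSet_at_append (xs : List String) (y v : String) (t : List String) :
    (xs ++ y :: t).set xs.length v = xs ++ v :: t := by
  induction xs with
  | nil => simp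
  | cons a r ih => simp [ih]

theorem pvGetD_at_append (xs : List String) (y : String) (t : List String) :
    (xs ++ y :: t).getD xs.length "" = y := by
  simp [List.getD]

-- A's loop body at index i advances the functional model by one element
theorem pvStepA_adv (lines0 : List String) (i : Nat) (hi : i < lines0.length) :
    pvStepA (pvFix ((lines0.take i).map pvNorm) ++ lines0.drop i) i
      = pvFix ((lines0.take (i+1)).map pvNorm) ++ lines0.drop (i+1) := by
  cases i with
  | zero =>
    cases lines0 with
    | nil => simp at hi
    | cons a t => simp [pvStepA, pvFix]
  | succ j =>
    have hdrop : lines0.drop (j+1) = lines0[j+1] :: lines0.drop (j+2) :=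
      List.drop_eq_getElem_cons hi
    set N := (lines0.take (j+1)).map pvNorm with hN
    set x := pvNorm lines0[j+1] with hx
    have htake : (lines0.take (j+2)).map pvNorm = N ++ [x] := by
      rw [hN, hx, show j+2 = j+1+1 from rfl, List.take_add_one, List.getElem?_eq_getElem hi]
      simp
      rw [List.take_add_one, List.getElem?_eq_getElem (by simpa using hi)]
      simp
    have hNlen : N.length = j + 1 := by
      rw [hN]
      simp
      omega
    have hNne : N ≠ [] := by
      intro h
      rw [h] at hNlen
      simp at hNlen
    set L := N.getLastD "" with hL
    -- decompose the state
    rw [pvFix_eq_body_append N hNne, hdrop]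
    have hblen : (pvBody N).length = j := by
      rw [pvBody_length, hNlen]
      omega
    have hlastx : (N ++ [x]).getLastD "" = x := by
      cases N with
      | nil => rfl
      | cons a t =>
        show ((a :: t) ++ [x]).getLast?.getD "" = x
        rw [List.getLast?_concat]
        rfl
    rw [htake, pvFix_eq_body_append (N ++ [x]) (by simp), pvBody_snoc N x hNne, hlastx, ← hL]
    simp only [pvStepA]
    rw [if_pos (by omega : 0 < j + 1)]
    have e1 : ((pvBody N ++ [L]) ++ lines0[j+1] :: lines0.drop (j+2)).getD (j+1) "" = lines0[j+1] := by
      have h := pvGetD_at_append (pvBody N ++ [L]) lines0[j+1] (lines0.drop (j+2))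
      simpa [hblen] using h
    have e2 : ((pvBody N ++ [L]) ++ lines0[j+1] :: lines0.drop (j+2)).set (j+1) x
        = pvBody N ++ L :: x :: lines0.drop (j+2) := by
      have h := pvSet_at_append (pvBody N ++ [L]) lines0[j+1] x (lines0.drop (j+2))
      simpa [hblen] using h
    have e3 : (pvBody N ++ L :: x :: lines0.drop (j+2)).getD j "" = L := by
      have h := pvGetD_at_append (pvBody N) L (x :: lines0.drop (j+2))
      simpa [hblen] using h
    have e4 : ∀ v, (pvBody N ++ L :: x :: lines0.drop (j+2)).set j v
        = pvBody N ++ v :: x :: lines0.drop (j+2) := by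
      intro v
      have h := pvSet_at_append (pvBody N) L v (x :: lines0.drop (j+2))
      simpa [hblen] using h
    simp only [Nat.add_sub_cancel]
    rw [e1, ← hx, e2, e3]
    -- case on the two python conditions
    by_cases h1 : PySem.Str.slice x none (some 2) = "- " ∧
        ¬ PySem.Str.slice L none (some 2) = "- " ∧ L ≠ ""
    · rw [if_pos h1, e4]
      have e5 : (pvBody N ++ (L ++ "\n") :: x :: lines0.drop (j+2)).getD j "" = L ++ "\n" := by
        have h := pvGetD_at_append (pvBody N) (L ++ "\n") (x :: lines0.drop (j+2))
        simpa [hblen] using h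
      rw [e5]
      have hne : ¬ PySem.Str.slice x none (some 2) = "* " := by
        rw [h1.1]
        decide
      rw [if_neg (fun hc => hne hc.1)]
      have hb : pvNeedsBlank L x = true := by
        simp only [pvNeedsBlank, Bool.and_eq_true, Bool.or_eq_true, beq_iff_eq, bne_iff_ne, ne_eq]
        exact ⟨⟨Or.inl h1.1, fun h => h1.2.1 (by rw [h, h1.1])⟩, h1.2.2⟩
      rw [if_pos hb]
      simp
    · rw [if_neg h1, e3]
      by_cases h2 : PySem.Str.slice x none (some 2) = "* " ∧
          ¬ PySem.Str.slice L none (some 2) = "* " ∧ L ≠ ""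
      · rw [if_pos h2, e4]
        have hb : pvNeedsBlank L x = true := by
          simp only [pvNeedsBlank, Bool.and_eq_true, Bool.or_eq_true, beq_iff_eq, bne_iff_ne, ne_eq]
          exact ⟨⟨Or.inr h2.1, fun h => h2.2.1 (by rw [h, h2.1])⟩, h2.2.2⟩
        rw [if_pos hb]
        simp
      · rw [if_neg h2]
        have hb : ¬ pvNeedsBlank L x = true := by
          simp only [pvNeedsBlank, Bool.and_eq_true, Bool.or_eq_true, beq_iff_eq, bne_iff_ne, ne_eq]
          rintro ⟨⟨hc1 | hc1, hc2⟩, hc3⟩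
          · exact h1 ⟨hc1, fun h => hc2 (by rw [h, hc1]), hc3⟩
          · exact h2 ⟨hc1, fun h => hc2 (by rw [h, hc1]), hc3⟩
        rw [if_neg hb]
        simp

-- the whole loop equals the functional model
theorem pvLoopA (lines0 : List String) :
    (List.range lines0.length).foldl pvStepA lines0 = pvFix (lines0.map pvNorm) := by
  suffices h : ∀ i ≤ lines0.length,
      (List.range i).foldl pvStepA lines0 = pvFix ((lines0.take i).map pvNorm) ++ lines0.drop i by
    have := h lines0.length le_rfl
    simpa using this
  intro i
  induction i with
  | zero => simp [pvFix]
  | succ j ih =>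
    intro hj
    rw [List.range_succ, List.foldl_append, List.foldl_cons, List.foldl_nil,
      ih (by omega), pvStepA_adv lines0 j (by omega)]

-- join sep (p :: rest) for nonempty rest
theorem pvJoin_cons (sep p : List Char) (rest : List (List Char)) (h : rest ≠ []) :
    PySem.Chars.join sep (p :: rest) = p ++ sep ++ PySem.Chars.join sep rest := by
  cases rest with
  | nil => exact absurd rfl h
  | cons q rs => exact PySem.Chars.join_cons_cons sep p q rs

theorem pvFix_cons_ne_nil (b : String) (r : List String) : pvFix (b :: r) ≠ [] := by
  cases r <;> simp [pvFix]

theorem pvWeave_cons_ne_nil (b : String) (r : List String) : pvWeave (b :: r) ≠ [] := by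
  cases r with
  | nil => simp [pvWeave]
  | cons c u => simp only [pvWeave]; split <;> simp

-- joining with '\n' a list whose element carries a trailing '\n' = joining with an inserted ''
theorem pvJoin_fix_weave : ∀ (l : List String),
    PySem.Str.join "\n" (pvFix l) = PySem.Str.join "\n" (pvWeave l) := by
  have key : ∀ (t : List String) (a : String),
      PySem.Str.join "\n" (pvFix (a :: t)) = PySem.Str.join "\n" (pvWeave (a :: t)) := by
    intro t
    induction t with
    | nil => intro a; rfl
    | cons b r ih =>
      intro a
      apply String.toList_inj.mp
      have hJ : PySem.Chars.join "\n".toList ((pvFix (b :: r)).map String.toList)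
          = PySem.Chars.join "\n".toList ((pvWeave (b :: r)).map String.toList) := by
        have := congrArg String.toList (ih b)
        rwa [PySem.Str.toList_join, PySem.Str.toList_join] at this
      rw [PySem.Str.toList_join, PySem.Str.toList_join]
      simp only [pvFix, pvWeave]
      by_cases hb : pvNeedsBlank a b = true
      · rw [if_pos hb, if_pos hb]
        simp only [List.map_cons]
        rw [pvJoin_cons _ _ _ (by simp [pvFix_cons_ne_nil]),
          pvJoin_cons _ _ _ (by simp),
          pvJoin_cons _ _ _ (by simp [pvWeave_cons_ne_nil]), hJ]
        simp
      · rw [if_neg hb, if_neg hb]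
        simp only [List.map_cons]
        rw [pvJoin_cons _ _ _ (by simp [pvFix_cons_ne_nil]),
          pvJoin_cons _ _ _ (by simp [pvWeave_cons_ne_nil]), hJ]
  intro l
  cases l with
  | nil => rfl
  | cons a t => exact key t a

-- ===== VERDICT (by name: the statement is the Claim_ definition above) =====
theorem fix_md_spec : Claim_equal_fix_md := by
  intro markdown _
  unfold Spec_fix_md fix_md fix_md_alt
  show PySem.Str.join "\n"
      ((List.range ((PySem.Str.split? markdown "\n").getD []).length).foldl pvStepA
        ((PySem.Str.split? markdown "\n").getD [])) = _
  rw [pvLoopA, pvJoin_fix_weave]
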